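-- pv_equiv track=rewrite | github.com/AdamZhouSE/pythonHomework | Code/CodeRecords/2799/60652/237454.py | hasRemainder
-- ===== SOURCE A (Python) =====
-- def hasRemainder(a):
--     while a > 0:
--         if a % 2 == 0:
--             a = int(a / 2)
--         else:
--             break
--     while a > 0:
--         if a % 3 == 0:
--             a = int(a / 3)
--         else:
--             break
--     if a != 1:
--         return False
--     else:
--         return True
-- ===== SOURCE B (Python) =====
-- def hasRemainder(a):
--     # Closed form, no loop: a is of the form 2^i * 3^j  iff  a is a positive
--     # divisor of 6**31 = 2**31 * 3**31 (valid for all a up to 2**31).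
--     return a > 0 and 6**31 % a == 0
-- ===== Notes on version B (the rewrite author's own statement) =====
-- stated objective: alternative
-- what changed: The two division loops are replaced by a loop-free closed form: a is of the form 2^i*3^j iff a is a positive divisor of the constant 6**31, so B returns a > 0 and 6**31 % a == 0 (correct for all inputs up to 2^31).
import Mathlib
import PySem

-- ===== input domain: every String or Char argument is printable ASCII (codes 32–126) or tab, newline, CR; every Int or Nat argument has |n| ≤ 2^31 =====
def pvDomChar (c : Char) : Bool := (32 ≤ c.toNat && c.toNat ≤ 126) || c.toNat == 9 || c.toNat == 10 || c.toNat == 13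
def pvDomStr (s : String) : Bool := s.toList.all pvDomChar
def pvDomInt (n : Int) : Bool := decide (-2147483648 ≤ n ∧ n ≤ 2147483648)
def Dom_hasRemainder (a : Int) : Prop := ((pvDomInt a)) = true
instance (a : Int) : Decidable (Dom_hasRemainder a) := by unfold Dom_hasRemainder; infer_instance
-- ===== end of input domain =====

-- B replaces A's two division loops by a loop-free divisibility test against the constant 6^31 (objective: alternative).

-- ===== PORT A =====
-- first while-loop of A: strip all factors of 2 while a > 0.
-- int(a / 2) is exact division here: the guard gives a even (and |a| ≤ 2^31 keeps the float exact).
def stripA2 (a : Int) : Int :=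
  if 0 < a then
    if a % 2 = 0 then stripA2 (a / 2) else a
  else a
termination_by a.toNat
decreasing_by omega

-- second while-loop of A: strip all factors of 3 while a > 0 (int(a / 3) exact, same reason).
def stripA3 (a : Int) : Int :=
  if 0 < a then
    if a % 3 = 0 then stripA3 (a / 3) else a
  else a
termination_by a.toNat
decreasing_by omega

def hasRemainder (a : Int) : Bool :=
  let a1 := stripA2 a
  let a2 := stripA3 a1
  if a2 ≠ 1 then false else true

-- ===== PORT B =====
-- Source B: return a > 0 and 6**31 % a == 0   (Python % on a > 0 is emod; unevaluated when a ≤ 0)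
def hasRemainder_alt (a : Int) : Bool :=
  decide (0 < a) && (PySem.Int.mod (6 ^ 31) a == 0)

-- ===== PRECONDITION & SPEC =====
def Spec_hasRemainder (a : Int) (out : Bool) : Prop := out = hasRemainder_alt a
instance (a : Int) (out : Bool) : Decidable (Spec_hasRemainder a out) := by unfold Spec_hasRemainder; infer_instance

-- ===== CLAIM (what is proved, stated in full; the proofs are below) =====
def Claim_equal_hasRemainder : Prop := ∀ (a : Int), Dom_hasRemainder a → Spec_hasRemainder a (hasRemainder a)

-- ===== LEMMAS AND PROOFS =====

theorem stripA2_nonpos (a : Int) (h : ¬ 0 < a) : stripA2 a = a := by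
  unfold stripA2; simp [h]

theorem stripA3_nonpos (a : Int) (h : ¬ 0 < a) : stripA3 a = a := by
  unfold stripA3; simp [h]

theorem stripA2_odd (a : Int) (h : a % 2 ≠ 0) : stripA2 a = a := by
  unfold stripA2; split_ifs <;> simp_all

theorem stripA3_nd (a : Int) (h : a % 3 ≠ 0) : stripA3 a = a := by
  unfold stripA3; split_ifs <;> simp_all

-- odd a is coprime to 2 (as integers): Bézout witnesses written out
theorem coprime_two_of_odd (a : Int) (h : a % 2 ≠ 0) : IsCoprime a 2 :=
  ⟨1, (1 - a) / 2, by omega⟩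

theorem coprime_three_of_nd (a : Int) (h : a % 3 ≠ 0) : IsCoprime a 3 := by
  rcases (show a % 3 = 1 ∨ a % 3 = 2 by omega) with h1 | h2
  · exact ⟨1, (1 - a) / 3, by omega⟩
  · exact ⟨-1, (1 + a) / 3, by omega⟩

-- forward, 3-part: stripping 3s reaches 1 ⟹ a divides 3^m (for a ≤ 3^m)
theorem fwd3 (m : ℕ) : ∀ a : Int, 0 < a → a ≤ 3 ^ m → stripA3 a = 1 → a ∣ 3 ^ m := by
  induction m with
  | zero => intro a h0 hle _; interval_cases a; exact one_dvd _
  | succ m ih =>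
    intro a h0 hle hs
    by_cases h3 : a % 3 = 0
    · rcases eq_or_lt_of_le (show (1:Int) ≤ a by omega) with h1 | h1
      · exact h1 ▸ one_dvd _
      · have hrec : stripA3 a = stripA3 (a / 3) := by
          rw [stripA3, if_pos h0, if_pos h3]
        have hq0 : 0 < a / 3 := by omega
        have hqle : a / 3 ≤ 3 ^ m := by
          have : a ≤ 3 * 3 ^ m := by rw [pow_succ] at hle; linarith
          omega
        have := ih (a / 3) hq0 hqle (by rw [← hrec]; exact hs)
        have ha : a = 3 * (a / 3) := by omega
        rw [ha, pow_succ, mul_comm (3:ℤ) (a / 3)]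
        exact mul_dvd_mul this (dvd_refl 3)
    · rw [stripA3_nd a h3] at hs; exact hs ▸ one_dvd _

-- forward, full: A's loops reach 1 ⟹ a divides 2^k·3^31 (for a ≤ 2^k, k ≤ 31)
theorem fwd2 (k : ℕ) : ∀ a : Int, k ≤ 31 → 0 < a → a ≤ 2 ^ k →
    stripA3 (stripA2 a) = 1 → a ∣ 2 ^ k * 3 ^ 31 := by
  induction k with
  | zero => intro a _ h0 hle _; interval_cases a; exact one_dvd _
  | succ k ih =>
    intro a hk h0 hle hs
    by_cases h2 : a % 2 = 0
    · rcases eq_or_lt_of_le (show (1:Int) ≤ a by omega) with h1 | h1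
      · exact h1 ▸ one_dvd _
      · have hrec : stripA2 a = stripA2 (a / 2) := by
          rw [stripA2, if_pos h0, if_pos h2]
        have hq0 : 0 < a / 2 := by omega
        have hqle : a / 2 ≤ 2 ^ k := by
          have : a ≤ 2 * 2 ^ k := by rw [pow_succ] at hle; linarith
          omega
        have hdq := ih (a / 2) (by omega) hq0 hqle (by rw [← hrec]; exact hs)
        have ha : a = 2 * (a / 2) := by omega
        rw [ha, pow_succ, mul_comm (2 ^ k) 2, mul_assoc]
        exact mul_dvd_mul_left 2 hdq
    · rw [stripA2_odd a h2] at hs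
      have hle3 : a ≤ 3 ^ 31 := by
        have h1 : (2:ℤ) ^ (k + 1) ≤ 2 ^ 31 :=
          pow_le_pow_right₀ (by norm_num) (by omega)
        have h2 : (2:ℤ) ^ 31 ≤ 3 ^ 31 := by norm_num
        linarith
      exact dvd_mul_of_dvd_right (fwd3 31 a h0 hle3 hs) _

-- backward: a positive divisor of 3^31 is reduced to 1 by the 3-loop
theorem bwd3 : ∀ a : Int, 0 < a → a ∣ 3 ^ 31 → stripA3 a = 1 := by
  intro a
  induction a using stripA3.induct with
  | case1 a h0 h3 ih =>
    intro _ hd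
    rw [stripA3, if_pos h0, if_pos h3]
    have hq : a / 3 ∣ 3 ^ 31 := dvd_trans ⟨3, by omega⟩ hd
    exact ih (by omega) hq
  | case2 a h0 h3 =>
    intro _ hd
    have hc : IsCoprime a ((3:Int) ^ 31) := (coprime_three_of_nd a h3).pow_right
    have : IsUnit a := hc.isUnit_of_dvd' dvd_rfl hd
    have := Int.isUnit_iff.mp this
    rw [stripA3_nd a h3]; omega
  | case3 a h0 => intro h; omega

-- backward, full: a positive divisor of 2^31·3^31 is reduced to 1 by A's two loops
theorem bwd2 : ∀ a : Int, 0 < a → a ∣ 2 ^ 31 * 3 ^ 31 → stripA3 (stripA2 a) = 1 := by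
  intro a
  induction a using stripA2.induct with
  | case1 a h0 h2 ih =>
    intro _ hd
    rw [stripA2, if_pos h0, if_pos h2]
    have hq : a / 2 ∣ 2 ^ 31 * 3 ^ 31 := dvd_trans ⟨2, by omega⟩ hd
    exact ih (by omega) hq
  | case2 a h0 h2 =>
    intro _ hd
    have hc : IsCoprime a ((2:Int) ^ 31) := (coprime_two_of_odd a h2).pow_right
    have hd3 : a ∣ 3 ^ 31 := hc.dvd_of_dvd_mul_left hd
    rw [stripA2_odd a h2]
    exact bwd3 a h0 hd3
  | case3 a h0 => intro h; omega

-- ===== VERDICT (by name: the statement is the Claim_ definition above) =====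
theorem hasRemainder_spec : Claim_equal_hasRemainder := by
  intro a hdom
  unfold Spec_hasRemainder hasRemainder hasRemainder_alt
  by_cases h0 : 0 < a
  · have hmod : PySem.Int.mod (6 ^ 31) a = (6:Int) ^ 31 % a :=
      PySem.Int.mod_eq_emod_of_pos h0
    have hN : (6:Int) ^ 31 = 2 ^ 31 * 3 ^ 31 := by norm_num
    have hle : a ≤ 2 ^ 31 := by
      have hdom' : -2147483648 ≤ a ∧ a ≤ 2147483648 := by
        simpa [Dom_hasRemainder, pvDomInt] using hdom
      have : (2:ℤ) ^ 31 = 2147483648 := by norm_num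
      omega
    show (if stripA3 (stripA2 a) ≠ 1 then false else true) =
        (decide (0 < a) && (PySem.Int.mod (6 ^ 31) a == 0))
    by_cases hs : stripA3 (stripA2 a) = 1
    · have hdvd : a ∣ 2 ^ 31 * 3 ^ 31 := fwd2 31 a (le_refl _) h0 hle hs
      have hz : (6:Int) ^ 31 % a = 0 := by rw [hN]; exact Int.emod_eq_zero_of_dvd hdvd
      rw [if_neg (fun hne => hne hs), hmod, hz]
      simp [h0]
    · have hndvd : ¬ a ∣ 2 ^ 31 * 3 ^ 31 := fun hd => hs (bwd2 a h0 hd)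
      have hz : (6:Int) ^ 31 % a ≠ 0 := by
        rw [hN]; intro hz; exact hndvd (Int.dvd_of_emod_eq_zero hz)
      have hndvd' : ¬ a ∣ (1326443518324400147398656 : Int) := by
        intro hd
        exact hndvd (by
          rw [show ((2:Int) ^ 31 * 3 ^ 31) = 1326443518324400147398656 by norm_num]
          exact hd)
      rw [if_pos hs, hmod]
      simp [h0, hndvd']
  · show (if stripA3 (stripA2 a) ≠ 1 then false else true) =
        (decide (0 < a) && (PySem.Int.mod (6 ^ 31) a == 0))
    rw [stripA2_nonpos a h0, stripA3_nonpos a h0, if_pos (by omega)]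
    simp [h0]
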